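-- pv_equiv track=rewrite | github.com/981377660LMT/algorithm-study | 19_数学/floorSum.py | floorSum2D
-- ===== SOURCE A (Python) =====
-- def floorSum2D(n: int, m: int) -> int:
--     """
--     二维整除分块和。
--     ∑{i=1..min(n,m)} floor(n/i)*floor(m/i)
--     """
--
--     def min(a, b):
--         return a if a < b else b
--
--     res = 0
--     left, right = 1, 0
--     min_ = min(n, m)
--     while left <= min_:
--         hn, hm = n // left, m // left
--         right = min(n // hn, m // hm)
--         w = right - left + 1
--         res += hn * hm * w
--         left = right + 1
--     return res
-- ===== SOURCE B (Python) =====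
-- def floorSum2D(n: int, m: int) -> int:
--     res = 0
--     for i in range(1, min(n, m) + 1):
--         res += (n // i) * (m // i)
--     return res
-- ===== Notes on version B (the rewrite author's own statement) =====
-- stated objective: simpler
-- what changed: Replaced the divisor-block jumping loop (grouping equal quotient pairs and adding hn*hm*width per block) with a direct one-variable loop adding floor(n/i)*floor(m/i) for every i from 1 to min(n,m).
import Mathlib
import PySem

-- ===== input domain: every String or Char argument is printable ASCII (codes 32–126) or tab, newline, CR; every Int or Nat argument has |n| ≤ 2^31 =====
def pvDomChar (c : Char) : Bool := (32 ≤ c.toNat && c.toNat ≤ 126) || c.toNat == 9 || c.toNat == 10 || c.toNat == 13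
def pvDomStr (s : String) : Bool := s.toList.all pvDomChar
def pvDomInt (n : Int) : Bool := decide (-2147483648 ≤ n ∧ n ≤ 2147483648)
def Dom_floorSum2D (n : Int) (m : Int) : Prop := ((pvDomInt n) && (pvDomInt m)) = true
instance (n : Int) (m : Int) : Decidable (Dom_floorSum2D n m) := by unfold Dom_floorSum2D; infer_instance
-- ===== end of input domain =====

-- B replaces A's divisor-block jumping loop by the plain sum of (n//i)*(m//i) for i = 1..min(n,m): simpler, not faster.

-- ===== PORT A =====
-- A's inner helper `min`
def pvMinA (a b : Int) : Int := if a < b then a else b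

-- A's while loop; fuel only makes the recursion total, the computation is A's step for step
def floorA (n m min_ : Int) (left res : Int) : Nat → Int
  | 0 => res
  | fuel + 1 =>
    if left ≤ min_ then
      let hn := PySem.Int.floordiv n left
      let hm := PySem.Int.floordiv m left
      let right := pvMinA (PySem.Int.floordiv n hn) (PySem.Int.floordiv m hm)
      let w := right - left + 1
      floorA n m min_ (right + 1) (res + hn * hm * w) fuel
    else res

def floorSum2D (n : Int) (m : Int) : Int :=
  let min_ := pvMinA n m
  floorA n m min_ 1 0 (min_.toNat + 1)

-- ===== PORT B =====
def floorSum2D_alt (n : Int) (m : Int) : Int :=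
  (PySem.List.pyRange 1 (min n m + 1) 1).foldl
    (fun res i => res + PySem.Int.floordiv n i * PySem.Int.floordiv m i) 0

-- ===== PRECONDITION & SPEC =====
def Spec_floorSum2D (n : Int) (m : Int) (out : Int) : Prop := out = floorSum2D_alt n m
instance (n : Int) (m : Int) (out : Int) : Decidable (Spec_floorSum2D n m out) := by unfold Spec_floorSum2D; infer_instance

-- ===== CLAIM (what is proved, stated in full; the proofs are below) =====
def Claim_equal_floorSum2D : Prop := ∀ (n : Int) (m : Int), Dom_floorSum2D n m → Spec_floorSum2D n m (floorSum2D n m)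

-- ===== LEMMAS AND PROOFS =====

-- the B-side sum over i ∈ [lo, hi)
def pvS (n m lo hi : Int) : Int :=
  (PySem.List.pyRange lo hi 1).foldl
    (fun res i => res + PySem.Int.floordiv n i * PySem.Int.floordiv m i) 0

theorem pvMinA_eq_min (a b : Int) : pvMinA a b = min a b := by
  unfold pvMinA; rcases lt_trichotomy a b with h | h | h <;> simp [min_def] <;> omega

theorem foldl_shift (g : Int → Int) :
    ∀ (l : List Int) (acc : Int),
      l.foldl (fun a i => a + g i) acc = acc + l.foldl (fun a i => a + g i) 0 := by
  intro l
  induction l with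
  | nil => intro acc; simp
  | cons x xs ih => intro acc; simp only [List.foldl_cons]; rw [ih, ih (0 + g x)]; ring

theorem foldl_const (g : Int → Int) (c : Int) :
    ∀ (l : List Int) (acc : Int), (∀ i ∈ l, g i = c) →
      l.foldl (fun a i => a + g i) acc = acc + c * l.length := by
  intro l
  induction l with
  | nil => intro acc _; simp
  | cons x xs ih =>
      intro acc h
      simp only [List.foldl_cons]
      rw [ih (acc + g x) (fun i hi => h i (List.mem_cons_of_mem x hi)),
          h x (List.mem_cons_self)]
      simp only [List.length_cons]
      push_cast
      ring

theorem pvS_empty (n m lo hi : Int) (h : hi ≤ lo) : pvS n m lo hi = 0 := by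
  unfold pvS
  rw [PySem.List.pyRange_one_eq_nil h]
  simp

theorem pvS_split (n m lo mid hi : Int) (h1 : lo ≤ mid) (h2 : mid ≤ hi) :
    pvS n m lo hi = pvS n m lo mid + pvS n m mid hi := by
  unfold pvS
  rw [PySem.List.pyRange_one_append lo mid hi h1 h2, List.foldl_append,
      foldl_shift (fun i => PySem.Int.floordiv n i * PySem.Int.floordiv m i)]

-- floordiv times its positive divisor is at most the dividend
theorem floordiv_mul_le (a b : Int) (hb : 0 < b) : PySem.Int.floordiv a b * b ≤ a := by
  exact (PySem.Int.le_floordiv_iff_mul_le hb).mp le_rfl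

-- the quotients are constant on the block [left, right]
theorem quot_const (a i left : Int) (h1 : 0 < left) (hla : left ≤ a) (h2 : left ≤ i)
    (h3 : i ≤ PySem.Int.floordiv a (PySem.Int.floordiv a left)) :
    PySem.Int.floordiv a i = PySem.Int.floordiv a left := by
  have hi : 0 < i := lt_of_lt_of_le h1 h2
  have hq : 0 < PySem.Int.floordiv a left := by
    have h : (1:Int) ≤ PySem.Int.floordiv a left :=
      (PySem.Int.le_floordiv_iff_mul_le h1).mpr (by rw [one_mul]; exact hla)
    omega
  -- lower: from i ≤ a // (a//left), get (a//left) * i ≤ a, hence a//left ≤ a//i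
  have hlow : PySem.Int.floordiv a left ≤ PySem.Int.floordiv a i := by
    rw [PySem.Int.le_floordiv_iff_mul_le hi]
    have := (PySem.Int.le_floordiv_iff_mul_le hq).mp h3
    linarith
  -- upper: a//i ≤ a//left since (a//i)*left ≤ (a//i)*i ≤ a
  have hup : PySem.Int.floordiv a i ≤ PySem.Int.floordiv a left := by
    rw [PySem.Int.le_floordiv_iff_mul_le h1]
    have h4 : PySem.Int.floordiv a i * i ≤ a := floordiv_mul_le a i hi
    have h5 : 0 ≤ PySem.Int.floordiv a i := by
      rw [PySem.Int.le_floordiv_iff_mul_le hi]; simp; omega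
    nlinarith
  omega

theorem floorA_correct (n m : Int) :
    ∀ (fuel : Nat) (left res : Int), 1 ≤ left →
      (min n m - left + 1).toNat ≤ fuel →
      floorA n m (min n m) left res fuel = res + pvS n m left (min n m + 1) := by
  intro fuel
  induction fuel with
  | zero =>
      intro left res h1 h2
      have : min n m + 1 ≤ left := by omega
      rw [pvS_empty n m _ _ this]
      simp [floorA]
  | succ fuel ih =>
      intro left res h1 h2
      by_cases hle : left ≤ min n m
      · have hln : left ≤ n := le_trans hle (min_le_left n m)
        have hlm : left ≤ m := le_trans hle (min_le_right n m)
        have h0 : (0:Int) < left := h1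
        set hn := PySem.Int.floordiv n left with hhn
        set hm := PySem.Int.floordiv m left with hhm
        have hnpos : 0 < hn := by
          have h : (1:Int) ≤ hn :=
            (PySem.Int.le_floordiv_iff_mul_le h0).mpr (by rw [one_mul]; exact hln)
          omega
        have hmpos : 0 < hm := by
          have h : (1:Int) ≤ hm :=
            (PySem.Int.le_floordiv_iff_mul_le h0).mpr (by rw [one_mul]; exact hlm)
          omega
        set rn := PySem.Int.floordiv n hn with hrn
        set rm := PySem.Int.floordiv m hm with hrm
        have hlrn : left ≤ rn := by
          rw [hrn, PySem.Int.le_floordiv_iff_mul_le hnpos]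
          have := floordiv_mul_le n left h0
          rw [← hhn] at this; linarith
        have hlrm : left ≤ rm := by
          rw [hrm, PySem.Int.le_floordiv_iff_mul_le hmpos]
          have := floordiv_mul_le m left h0
          rw [← hhm] at this; linarith
        have hrnn : rn ≤ n := by
          show PySem.Int.floordiv n hn ≤ n
          rw [PySem.Int.floordiv_eq_ediv_of_pos hnpos]
          exact Int.ediv_le_self hn (by omega)
        have hrmm : rm ≤ m := by
          show PySem.Int.floordiv m hm ≤ m
          rw [PySem.Int.floordiv_eq_ediv_of_pos hmpos]
          exact Int.ediv_le_self hm (by omega)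
        set right := pvMinA rn rm with hright
        have hrmin : right = min rn rm := pvMinA_eq_min rn rm
        have hlr : left ≤ right := by rw [hrmin]; exact le_min hlrn hlrm
        have hrle : right ≤ min n m := by
          rw [hrmin]
          exact le_min (le_trans (min_le_left _ _) hrnn) (le_trans (min_le_right _ _) hrmm)
        -- one step of A
        show (if left ≤ min n m then _ else res) = _
        rw [if_pos hle]
        rw [ih (right + 1) _ (by omega) (by omega)]
        -- split the sum at right + 1
        rw [pvS_split n m left (right + 1) (min n m + 1) (by omega) (by omega)]
        -- the first block is constant
        have hconst : pvS n m left (right + 1)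
            = hn * hm * (right - left + 1) := by
          unfold pvS
          rw [foldl_const (fun i => PySem.Int.floordiv n i * PySem.Int.floordiv m i)
              (hn * hm) _ 0 ?_]
          · rw [PySem.List.length_pyRange_one]
            have : ((right + 1 - left).toNat : Int) = right - left + 1 := by omega
            rw [this]; ring
          · intro i hi
            rw [PySem.List.mem_pyRange_one] at hi
            have hi1 : left ≤ i := hi.1
            have hi2 : i ≤ right := by omega
            have hirn : i ≤ rn := le_trans (hrmin ▸ hi2) (min_le_left _ _)
            have hirm : i ≤ rm := le_trans (hrmin ▸ hi2) (min_le_right _ _)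
            have e1 : PySem.Int.floordiv n i = hn :=
              quot_const n i left h0 hln hi1 hirn
            have e2 : PySem.Int.floordiv m i = hm :=
              quot_const m i left h0 hlm hi1 hirm
            show PySem.Int.floordiv n i * PySem.Int.floordiv m i = hn * hm
            rw [e1, e2]
        rw [hconst]; ring
      · show (if left ≤ min n m then _ else res) = _
        rw [if_neg hle, pvS_empty n m _ _ (by omega)]
        omega

-- ===== VERDICT (by name: the statement is the Claim_ definition above) =====
theorem floorSum2D_spec : Claim_equal_floorSum2D := by
  intro n m _
  show floorSum2D n m = floorSum2D_alt n m
  unfold floorSum2D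
  rw [pvMinA_eq_min]
  rw [floorA_correct n m ((min n m).toNat + 1) 1 0 le_rfl (by omega)]
  unfold floorSum2D_alt pvS
  simp
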